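-- pv_equiv track=rewrite | github.com/timothepearce/synda | synda/config/input.py | _get_page_indices
-- ===== SOURCE A (Python) =====
-- def _get_page_indices(pages: list[str], total: int) -> list[int]:
--     if not pages:
--         return list(range(total))
--
--     indices = set()
--     for spec in pages:
--         if "-" in spec:
--             start, end = map(int, spec.split("-"))
--             indices.update(range(start - 1, end))
--         else:
--             indices.add(int(spec) - 1)
--
--     return [i for i in sorted(indices) if 0 <= i < total]
-- ===== SOURCE B (Python) =====
-- def _get_page_indices(pages: list[str], total: int) -> list[int]:
--     if not pages:
--         return list(range(total))
--
--     intervals = []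
--     for spec in pages:
--         if "-" in spec:
--             start, end = map(int, spec.split("-"))
--             lo, hi = start - 1, end
--         else:
--             page = int(spec)
--             lo, hi = page - 1, page
--         lo = max(lo, 0)
--         hi = min(hi, total)
--         if lo < hi:
--             intervals.append((lo, hi))
--     intervals.sort(key=lambda iv: iv[0])
--
--     result = []
--     cur = 0
--     for lo, hi in intervals:
--         start = max(lo, cur)
--         if start < hi:
--             result.extend(range(start, hi))
--             cur = hi
--     return result
-- ===== Notes on version B (the rewrite author's own statement) =====
-- stated objective: faster
-- what changed: B replaces A's materialised set of every listed page index (set.update over whole ranges, then sort + filter) by a list of clamped half-open intervals, sorted by start and merged in one pass, so work is proportional to the number of specs plus the returned indices instead of the raw range sizes.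
import Mathlib
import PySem

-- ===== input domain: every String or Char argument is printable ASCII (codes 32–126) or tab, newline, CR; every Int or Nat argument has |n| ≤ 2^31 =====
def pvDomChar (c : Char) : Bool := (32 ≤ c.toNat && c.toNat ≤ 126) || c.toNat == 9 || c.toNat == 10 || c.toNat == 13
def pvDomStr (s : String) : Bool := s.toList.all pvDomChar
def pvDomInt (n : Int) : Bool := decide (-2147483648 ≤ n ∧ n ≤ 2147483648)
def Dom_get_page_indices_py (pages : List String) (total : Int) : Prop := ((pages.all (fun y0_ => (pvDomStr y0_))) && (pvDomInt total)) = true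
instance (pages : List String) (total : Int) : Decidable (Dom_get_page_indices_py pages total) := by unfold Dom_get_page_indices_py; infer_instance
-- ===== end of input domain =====

-- B replaces A's materialised index set + sort by clamped intervals sorted by start and a single
-- merge pass; equivalence of the two ports is proved on every input where the Python A returns.

-- ===== PORT A =====
-- one loop iteration: parse `spec` and add its pages to the set (default branches are where Python raises ValueError; excluded by Pre_)
def pvAddSpec (ind : PySem.Set Int) (spec : String) : PySem.Set Int :=
  if PySem.Str.isIn "-" spec then
    match PySem.Str.split? spec "-" with
    | some [s1, s2] =>
      match PySem.Int.ofStr? s1, PySem.Int.ofStr? s2 with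
      | some start, some stop => PySem.Set.update ind (PySem.List.pyRange (start - 1) stop 1)
      | _, _ => ind
    | _ => ind
  else
    match PySem.Int.ofStr? spec with
    | some p => PySem.Set.add ind (p - 1)
    | none => ind

def get_page_indices_py (pages : List String) (total : Int) : List Int :=
  if pages = [] then PySem.List.pyRange 0 total 1
  else
    let indices := pages.foldl pvAddSpec PySem.Set.empty
    (PySem.List.sorted indices (fun i => i) false).filter (fun i => decide (0 ≤ i ∧ i < total))

-- ===== PORT B =====
-- one loop iteration of B: parse `spec`, clamp its half-open interval to [0, total), keep it if nonempty
def pvCollect (total : Int) (ivs : List (Int × Int)) (spec : String) : List (Int × Int) :=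
  let p : Int × Int :=
    if PySem.Str.isIn "-" spec then
      match PySem.Str.split? spec "-" with
      | some [s1, s2] =>
        match PySem.Int.ofStr? s1, PySem.Int.ofStr? s2 with
        | some start, some stop => (start - 1, stop)
        | _, _ => (0, 0)
      | _ => (0, 0)
    else
      match PySem.Int.ofStr? spec with
      | some q => (q - 1, q)
      | none => (0, 0)
  let lo := max p.1 0
  let hi := min p.2 total
  if lo < hi then ivs ++ [(lo, hi)] else ivs

-- one merge iteration: emit the part of the interval above the already-emitted frontier
def pvMergeStep (st : List Int × Int) (p : Int × Int) : List Int × Int :=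
  let s := max p.1 st.2
  if s < p.2 then (st.1 ++ PySem.List.pyRange s p.2 1, p.2) else st

def get_page_indices_py_alt (pages : List String) (total : Int) : List Int :=
  if pages = [] then PySem.List.pyRange 0 total 1
  else
    let intervals := pages.foldl (pvCollect total) []
    let sortedIvs := PySem.List.sorted intervals (fun iv => iv.1) false
    (sortedIvs.foldl pvMergeStep ([], 0)).1

-- ===== PRECONDITION & SPEC =====
-- Pre_ excludes exactly the inputs where Python A raises ValueError: a spec whose '-'-split does not
-- have exactly two int()-parsable parts, or a spec without '-' that int() cannot parse.
def Pre_get_page_indices_py (pages : List String) (total : Int) : Prop :=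
  ∀ spec ∈ pages,
    if PySem.Str.isIn "-" spec = true then
      ((PySem.Str.split? spec "-").getD []).length = 2 ∧
        ∀ part ∈ (PySem.Str.split? spec "-").getD [], (PySem.Int.ofStr? part).isSome = true
    else (PySem.Int.ofStr? spec).isSome = true
instance (pages : List String) (total : Int) : Decidable (Pre_get_page_indices_py pages total) := by
  unfold Pre_get_page_indices_py; infer_instance

def pvWitness_get_page_indices_py : List String × Int := (["1-3", "7", "2-5"], 6)

def Spec_get_page_indices_py (pages : List String) (total : Int) (out : List Int) : Prop := out = get_page_indices_py_alt pages total
instance (pages : List String) (total : Int) (out : List Int) : Decidable (Spec_get_page_indices_py pages total out) := by unfold Spec_get_page_indices_py; infer_instance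

-- ===== CLAIM (what is proved, stated in full; the proofs are below) =====
def Claim_equal_get_page_indices_py : Prop := ∀ (pages : List String) (total : Int), Dom_get_page_indices_py pages total → Pre_get_page_indices_py pages total → Spec_get_page_indices_py pages total (get_page_indices_py pages total)

-- ===== LEMMAS AND PROOFS =====

-- coverage of index i by one raw spec, as A parses it
def pvSpecCov (spec : String) (i : Int) : Bool :=
  if PySem.Str.isIn "-" spec then
    match PySem.Str.split? spec "-" with
    | some [s1, s2] =>
      match PySem.Int.ofStr? s1, PySem.Int.ofStr? s2 with
      | some start, some stop => decide (start - 1 ≤ i ∧ i < stop)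
      | _, _ => false
    | _ => false
  else
    match PySem.Int.ofStr? spec with
    | some q => decide (i = q - 1)
    | none => false

-- coverage of index i by a list of half-open intervals
def pvCov (ivs : List (Int × Int)) (i : Int) : Bool := ivs.any (fun p => decide (p.1 ≤ i ∧ i < p.2))

lemma pvCov_iff (ivs : List (Int × Int)) (i : Int) :
    pvCov ivs i = true ↔ ∃ p ∈ ivs, p.1 ≤ i ∧ i < p.2 := by
  simp [pvCov]

-- one step of A's loop, membership
lemma pv_mem_addSpec (s : PySem.Set Int) (spec : String) (i : Int) :
    i ∈ pvAddSpec s spec ↔ i ∈ s ∨ pvSpecCov spec i = true := by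
  unfold pvAddSpec pvSpecCov
  by_cases h : PySem.Str.isIn "-" spec = true
  · simp only [h, if_true]
    cases hs : PySem.Str.split? spec "-" with
    | none => simp
    | some parts =>
      match parts with
      | [] => simp
      | [s1] => simp
      | [s1, s2] =>
        cases h1 : PySem.Int.ofStr? s1 with
        | none => simp [h1]
        | some a =>
          cases h2 : PySem.Int.ofStr? s2 with
          | none => simp [h1, h2]
          | some b =>
            simp [h1, h2, PySem.Set.mem_update, PySem.List.mem_pyRange_one]
      | s1 :: s2 :: s3 :: rest => simp
  · simp only [h]
    cases h1 : PySem.Int.ofStr? spec with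
    | none => simp
    | some q => simp [PySem.Set.mem_add]

-- membership in A's accumulated set
lemma pv_mem_foldl_addSpec (pages : List String) (s : PySem.Set Int) (i : Int) :
    i ∈ pages.foldl pvAddSpec s ↔ i ∈ s ∨ pages.any (fun spec => pvSpecCov spec i) = true := by
  induction pages generalizing s with
  | nil => simp
  | cons spec rest ih =>
    rw [List.foldl_cons, ih, pv_mem_addSpec]
    simp only [List.any_cons, Bool.or_eq_true]
    tauto

lemma pv_nodup_foldl_addSpec (pages : List String) (s : PySem.Set Int) (h : s.Nodup) :
    (pages.foldl pvAddSpec s).Nodup := by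
  induction pages generalizing s with
  | nil => exact h
  | cons spec rest ih =>
    rw [List.foldl_cons]
    apply ih
    unfold pvAddSpec
    by_cases hc : PySem.Str.isIn "-" spec = true
    · simp only [hc, if_true]
      cases PySem.Str.split? spec "-" with
      | none => exact h
      | some parts =>
        match parts with
        | [] => exact h
        | [s1] => exact h
        | [s1, s2] =>
          cases h1 : PySem.Int.ofStr? s1 with
          | none => simpa [h1] using h
          | some a =>
            cases h2 : PySem.Int.ofStr? s2 with
            | none => simpa [h1, h2] using h
            | some b => simpa [h1, h2] using PySem.Set.nodup_update _ _ h
        | s1 :: s2 :: s3 :: rest' => exact h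
    · simp only [hc]
      cases PySem.Int.ofStr? spec with
      | none => exact h
      | some q => exact PySem.Set.nodup_add _ _ h

-- one step of B's collecting loop, as an explicit clamped interval
lemma pv_collect_cases (total : Int) (ivs : List (Int × Int)) (spec : String) :
    ∃ lo hi : Int,
      pvCollect total ivs spec
          = (if max lo 0 < min hi total then ivs ++ [(max lo 0, min hi total)] else ivs) ∧
        ∀ i : Int, (pvSpecCov spec i = true ↔ lo ≤ i ∧ i < hi) := by
  unfold pvCollect pvSpecCov
  by_cases h : PySem.Str.isIn "-" spec = true
  · simp only [h, if_true]
    cases hs : PySem.Str.split? spec "-" with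
    | none => exact ⟨0, 0, rfl, by simp⟩
    | some parts =>
      match parts with
      | [] => exact ⟨0, 0, rfl, by simp⟩
      | [s1] => exact ⟨0, 0, rfl, by simp⟩
      | [s1, s2] =>
        cases h1 : PySem.Int.ofStr? s1 with
        | none => exact ⟨0, 0, by simp [h1], by simp [h1]⟩
        | some a =>
          cases h2 : PySem.Int.ofStr? s2 with
          | none => exact ⟨0, 0, by simp [h1, h2], by simp [h1, h2]⟩
          | some b => exact ⟨a - 1, b, by simp [h1, h2], by simp [h1, h2]⟩
      | s1 :: s2 :: s3 :: rest => exact ⟨0, 0, rfl, by simp⟩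
  · simp only [h]
    cases h1 : PySem.Int.ofStr? spec with
    | none => exact ⟨0, 0, by simp, by simp⟩
    | some q => exact ⟨q - 1, q, by simp, by intro i; simp; omega⟩

-- B's collected intervals: bounds
lemma pv_bounds_collect (total : Int) (pages : List String) (ivs : List (Int × Int))
    (h : ∀ p ∈ ivs, 0 ≤ p.1 ∧ p.1 < p.2 ∧ p.2 ≤ total) :
    ∀ p ∈ pages.foldl (pvCollect total) ivs, 0 ≤ p.1 ∧ p.1 < p.2 ∧ p.2 ≤ total := by
  induction pages generalizing ivs with
  | nil => exact h
  | cons spec rest ih =>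
    rw [List.foldl_cons]
    apply ih
    obtain ⟨lo, hi, heq, -⟩ := pv_collect_cases total ivs spec
    rw [heq]
    by_cases hlt : max lo 0 < min hi total
    · rw [if_pos hlt]
      intro p hpm
      rcases List.mem_append.1 hpm with hm | hm
      · exact h p hm
      · rcases List.mem_singleton.1 hm with rfl
        refine ⟨by omega, by omega, by omega⟩
    · rw [if_neg hlt]; exact h

-- B's collected intervals: coverage agrees with raw spec coverage on [0, total)
lemma pv_cov_collect (total : Int) (pages : List String) (ivs : List (Int × Int)) (i : Int)
    (h0 : 0 ≤ i) (h1 : i < total) :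
    (pvCov (pages.foldl (pvCollect total) ivs) i = true) ↔
      pvCov ivs i = true ∨ pages.any (fun spec => pvSpecCov spec i) = true := by
  induction pages generalizing ivs with
  | nil => simp
  | cons spec rest ih =>
    rw [List.foldl_cons, ih]
    have hstep : pvCov (pvCollect total ivs spec) i = true
        ↔ pvCov ivs i = true ∨ pvSpecCov spec i = true := by
      obtain ⟨lo, hi, heq, hiff⟩ := pv_collect_cases total ivs spec
      rw [heq]
      by_cases hlt : max lo 0 < min hi total
      · rw [if_pos hlt]
        simp only [pvCov, List.any_append, List.any_cons, List.any_nil, Bool.or_eq_true,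
          Bool.or_false, decide_eq_true_eq, hiff i]
        constructor
        · rintro (hA | hB)
          · exact Or.inl hA
          · exact Or.inr (by omega)
        · rintro (hA | hB)
          · exact Or.inl hA
          · exact Or.inr (by omega)
      · rw [if_neg hlt]
        simp only [hiff i]
        constructor
        · exact Or.inl
        · rintro (hA | hB)
          · exact hA
          · exfalso; omega
    rw [hstep]
    simp only [List.any_cons, Bool.or_eq_true]
    tauto

-- the merge pass emits exactly the covered indices of [cur, total), in order
lemma pv_merge_spec (total : Int) : ∀ (ivs : List (Int × Int)) (acc : List Int) (cur : Int),
    ivs.Pairwise (fun p q => p.1 ≤ q.1) →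
    (∀ p ∈ ivs, 0 ≤ p.1 ∧ p.1 < p.2 ∧ p.2 ≤ total) →
    (ivs.foldl pvMergeStep (acc, cur)).1
      = acc ++ (PySem.List.pyRange cur total 1).filter (fun i => pvCov ivs i) := by
  intro ivs
  induction ivs with
  | nil =>
    intro acc cur _ _
    simp [pvCov]
  | cons p rest ih =>
    intro acc cur hpw hbnd
    obtain ⟨lo, hi⟩ := p
    have hle : ∀ q ∈ rest, lo ≤ q.1 := by
      intro q hq; exact (List.pairwise_cons.1 hpw).1 q hq
    have hpwr := (List.pairwise_cons.1 hpw).2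
    have hbh := hbnd (lo, hi) List.mem_cons_self
    have hbr : ∀ q ∈ rest, 0 ≤ q.1 ∧ q.1 < q.2 ∧ q.2 ≤ total := by
      intro q hq; exact hbnd q (List.mem_cons_of_mem _ hq)
    have hcons : ∀ j : Int, pvCov ((lo, hi) :: rest) j
        = (decide (lo ≤ j ∧ j < hi) || pvCov rest j) := by
      intro j; simp [pvCov]
    rw [List.foldl_cons]
    by_cases hlt : max lo cur < hi
    · have hstep : pvMergeStep (acc, cur) (lo, hi)
          = (acc ++ PySem.List.pyRange (max lo cur) hi 1, hi) := by
        simp [pvMergeStep, hlt]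
      rw [hstep, ih _ _ hpwr hbr]
      have hsplit1 : PySem.List.pyRange cur total 1
          = PySem.List.pyRange cur hi 1 ++ PySem.List.pyRange hi total 1 :=
        PySem.List.pyRange_one_append cur hi total (by omega) (by omega)
      have hsplit2 : PySem.List.pyRange cur hi 1
          = PySem.List.pyRange cur (max lo cur) 1 ++ PySem.List.pyRange (max lo cur) hi 1 :=
        PySem.List.pyRange_one_append cur (max lo cur) hi (by omega) (by omega)
      rw [hsplit1, hsplit2, List.filter_append, List.filter_append]
      have hf1 : (PySem.List.pyRange cur (max lo cur) 1).filter
          (fun i => pvCov ((lo, hi) :: rest) i) = [] := by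
        rw [List.filter_eq_nil_iff]
        intro j hj
        have hjm := (PySem.List.mem_pyRange_one).1 hj
        have hjlo : j < lo := by omega
        rw [hcons j]
        simp only [Bool.or_eq_true, decide_eq_true_eq, not_or]
        refine ⟨by omega, ?_⟩
        simp only [pvCov, List.any_eq_true, decide_eq_true_eq, not_exists]
        intro q hq
        have := hle q hq.1
        omega
      have hf2 : (PySem.List.pyRange (max lo cur) hi 1).filter
          (fun i => pvCov ((lo, hi) :: rest) i) = PySem.List.pyRange (max lo cur) hi 1 := by
        rw [List.filter_eq_self]
        intro j hj
        have hjm := (PySem.List.mem_pyRange_one).1 hj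
        rw [hcons j]
        simp only [Bool.or_eq_true, decide_eq_true_eq]
        exact Or.inl (by omega)
      have hf3 : (PySem.List.pyRange hi total 1).filter (fun i => pvCov ((lo, hi) :: rest) i)
          = (PySem.List.pyRange hi total 1).filter (fun i => pvCov rest i) := by
        apply List.filter_congr
        intro j hj
        have hjm := (PySem.List.mem_pyRange_one).1 hj
        rw [hcons j]
        have : decide (lo ≤ j ∧ j < hi) = false := by simp; omega
        rw [this, Bool.false_or]
      rw [hf1, hf2, hf3]
      simp [List.append_assoc]
    · have hstep : pvMergeStep (acc, cur) (lo, hi) = (acc, cur) := by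
        simp only [pvMergeStep]
        rw [if_neg (by omega)]
      rw [hstep, ih _ _ hpwr hbr]
      congr 1
      apply List.filter_congr
      intro j hj
      have hjm := (PySem.List.mem_pyRange_one).1 hj
      rw [hcons j]
      have : decide (lo ≤ j ∧ j < hi) = false := by simp; omega
      rw [this, Bool.false_or]

-- two strictly increasing lists with the same members are equal
lemma pv_eq_of_pairwise_lt (l1 l2 : List Int) (h1 : l1.Pairwise (· < ·)) (h2 : l2.Pairwise (· < ·))
    (hm : ∀ x, x ∈ l1 ↔ x ∈ l2) : l1 = l2 :=
  List.Perm.eq_of_pairwise (fun _ _ _ _ h h' => absurd h' (lt_asymm h)) h1 h2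
    ((List.perm_ext_iff_of_nodup (h1.imp ne_of_lt) (h2.imp ne_of_lt)).2 hm)

-- A's result is the filtered range
lemma pv_A_eq_filter (pages : List String) (total : Int) (h : pages ≠ []) :
    get_page_indices_py pages total
      = (PySem.List.pyRange 0 total 1).filter
          (fun i => pages.any (fun spec => pvSpecCov spec i)) := by
  unfold get_page_indices_py
  rw [if_neg h]
  have hnd : (pages.foldl pvAddSpec PySem.Set.empty).Nodup :=
    pv_nodup_foldl_addSpec pages PySem.Set.empty List.nodup_nil
  apply pv_eq_of_pairwise_lt
  · apply List.Pairwise.filter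
    have hsp : (PySem.List.sorted (pages.foldl pvAddSpec PySem.Set.empty) (fun i => i) false).Pairwise
        (fun a b => a ≤ b) := PySem.List.sorted_pairwise _ _
    have hsn : (PySem.List.sorted (pages.foldl pvAddSpec PySem.Set.empty) (fun i => i) false).Nodup :=
      (PySem.List.sorted_perm _ _ false).nodup_iff.2 hnd
    exact (hsp.and hsn).imp (fun hab => lt_of_le_of_ne hab.1 hab.2)
  · exact (PySem.List.pairwise_lt_pyRange_one 0 total).filter _
  · intro x
    simp only [List.mem_filter, PySem.List.mem_sorted, pv_mem_foldl_addSpec,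
      PySem.List.mem_pyRange_one, decide_eq_true_eq]
    have : x ∈ PySem.Set.empty ↔ False := by simp [PySem.Set.empty]
    tauto

-- ===== VERDICT (by name: the statement is the Claim_ definition above) =====
theorem get_page_indices_py_spec : Claim_equal_get_page_indices_py := by
  intro pages total _hdom _hpre
  unfold Spec_get_page_indices_py
  by_cases hp : pages = []
  · simp [get_page_indices_py, get_page_indices_py_alt, hp]
  · rw [pv_A_eq_filter pages total hp]
    unfold get_page_indices_py_alt
    rw [if_neg hp]
    have hbnd : ∀ p ∈ pages.foldl (pvCollect total) [], 0 ≤ p.1 ∧ p.1 < p.2 ∧ p.2 ≤ total :=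
      pv_bounds_collect total pages [] (by simp)
    have hbnd' : ∀ p ∈ PySem.List.sorted (pages.foldl (pvCollect total) []) (fun iv => iv.1) false,
        0 ≤ p.1 ∧ p.1 < p.2 ∧ p.2 ≤ total := by
      intro p hpmem
      exact hbnd p ((PySem.List.mem_sorted _ _ _ _).1 hpmem)
    rw [pv_merge_spec total _ [] 0 (PySem.List.sorted_pairwise _ _) hbnd']
    rw [List.nil_append]
    apply List.filter_congr
    intro i hi
    have hi' := (PySem.List.mem_pyRange_one).1 hi
    have hcov : (pvCov (PySem.List.sorted (pages.foldl (pvCollect total) []) (fun iv => iv.1) false) i = true)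
        ↔ pvCov (pages.foldl (pvCollect total) []) i = true := by
      simp only [pvCov_iff]
      constructor
      · rintro ⟨p, hpm, hc⟩; exact ⟨p, (PySem.List.mem_sorted _ _ _ _).1 hpm, hc⟩
      · rintro ⟨p, hpm, hc⟩; exact ⟨p, (PySem.List.mem_sorted _ _ _ _).2 hpm, hc⟩
    have hraw := pv_cov_collect total pages [] i hi'.1 hi'.2
    simp only [show pvCov ([] : List (Int × Int)) i = false from rfl, Bool.false_eq_true,
      false_or] at hraw
    rw [hraw] at hcov
    exact Bool.eq_iff_iff.mpr hcov.symm
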